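-- pv_equiv track=rewrite | github.com/wolph/mt940 | mt940/processors.py | _parse_segments
-- ===== SOURCE A (Python) =====
-- import collections
--
-- def _parse_segments(detail_str: str) -> collections.OrderedDict[str, str]:
--     tmp: collections.OrderedDict[str, str] = collections.OrderedDict()
--     segment = ''
--     segment_type = ''
--
--     for index, char in enumerate(detail_str):
--         if char != '?':
--             segment += char
--             continue
--
--         if index + 2 >= len(detail_str):
--             break
--
--         tmp[segment_type] = segment if not segment_type else segment[2:]
--         segment_type = detail_str[index + 1] + detail_str[index + 2]
--         segment = ''
--
--     if segment_type:  # pragma: no branch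
--         tmp[segment_type] = segment if not segment_type else segment[2:]
--
--     return tmp
-- ===== SOURCE B (Python) =====
-- import collections
--
--
-- def _parse_segments(detail_str: str) -> 'collections.OrderedDict[str, str]':
--     # Delimiter-position walk: find every delimiter position once, then slice the string
--     # between consecutive delimiters instead of accumulating char by char.
--     n = len(detail_str)
--     qs = [i for i, c in enumerate(detail_str) if c == '?']
--     result: collections.OrderedDict[str, str] = collections.OrderedDict()
--     if not qs or qs[0] + 2 >= n:
--         return result
--     result[''] = detail_str[:qs[0]]
--     for k, i in enumerate(qs):
--         if i + 2 >= n: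
--             break
--         end = qs[k + 1] if k + 1 < len(qs) else n
--         result[detail_str[i + 1:i + 3]] = detail_str[i + 3:end]
--     return result
-- ===== Notes on version B (the rewrite author's own statement) =====
-- stated objective: alternative
-- what changed: Replaces A's char-by-char state machine (accumulating a segment string and pending key while scanning every character) with a delimiter-position walk: collect all question-mark delimiter indices once, then emit each entry by slicing the string between consecutive delimiters.
import Mathlib
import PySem

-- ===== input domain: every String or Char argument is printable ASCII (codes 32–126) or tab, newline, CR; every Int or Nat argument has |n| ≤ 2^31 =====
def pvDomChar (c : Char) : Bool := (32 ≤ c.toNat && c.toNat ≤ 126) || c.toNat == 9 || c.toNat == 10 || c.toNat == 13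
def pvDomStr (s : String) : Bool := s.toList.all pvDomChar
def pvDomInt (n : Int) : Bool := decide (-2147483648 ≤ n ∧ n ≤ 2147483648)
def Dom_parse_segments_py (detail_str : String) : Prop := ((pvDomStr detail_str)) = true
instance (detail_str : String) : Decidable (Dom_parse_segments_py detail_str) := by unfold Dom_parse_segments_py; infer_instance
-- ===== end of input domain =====

-- B replaces A's char-by-char accumulator scan with a one-shot list of delimiter positions
-- plus slicing between consecutive delimiters (objective: alternative decomposition).
-- ===== PORT A =====
-- A's loop over enumerate(detail_str): state (tmp, segment, segment_type); the segment
-- is kept as List Char ('segment += char' is seg ++ [c], 'segment[2:]' is seg.drop 2,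
-- both exact); returns the state at loop exit ('break' returns early, exactly where
-- Python breaks).
def parseSegAGo (cs : List Char) : List (Int × Char) → PySem.Dict String String → List Char → String →
    PySem.Dict String String × List Char × String
  | [], tmp, seg, ty => (tmp, seg, ty)
  | (i, c) :: rest, tmp, seg, ty =>
    if c ≠ '?' then parseSegAGo cs rest tmp (seg ++ [c]) ty
    else if i + 2 ≥ (cs.length : Int) then (tmp, seg, ty)
    else
      parseSegAGo cs rest
        (tmp.insert ty (if ty = "" then String.ofList seg else String.ofList (seg.drop 2)))
        []
        (String.ofList [PySem.List.pyGetD cs (i + 1) ' ', PySem.List.pyGetD cs (i + 2) ' '])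

def parseSegAFin (st : PySem.Dict String String × List Char × String) : PySem.Dict String String :=
  if st.2.2 = "" then st.1
  else st.1.insert st.2.2 (if st.2.2 = "" then String.ofList st.2.1 else String.ofList (st.2.1.drop 2))

def parse_segments_py (detail_str : String) : List (String × String) :=
  (parseSegAFin (parseSegAGo detail_str.toList (PySem.List.enumerate detail_str.toList 0)
    PySem.Dict.empty [] "")).items


-- ===== PORT B =====
-- B's for-loop over enumerate(qs): recursion on the position list; the lookahead
-- 'qs[k+1] if k+1 < len(qs) else n' is the head of the remaining list (or n).
def parseSegBGo (cs : List Char) : List Int → PySem.Dict String String → PySem.Dict String String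
  | [], d => d
  | q :: qr, d =>
    if q + 2 ≥ (cs.length : Int) then d
    else
      parseSegBGo cs qr
        (d.insert (String.ofList (PySem.List.slice cs (some (q + 1)) (some (q + 3))))
                  (String.ofList (PySem.List.slice cs (some (q + 3))
                    (some (match qr with | [] => (cs.length : Int) | q' :: _ => q')))))

def parse_segments_py_alt (detail_str : String) : List (String × String) :=
  (match (PySem.List.enumerate detail_str.toList 0).filterMap
      (fun (ic : Int × Char) => if ic.2 = '?' then some ic.1 else none) with
   | [] => PySem.Dict.empty
   | q :: qr =>
     if q + 2 ≥ (detail_str.toList.length : Int) then PySem.Dict.empty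
     else parseSegBGo detail_str.toList (q :: qr)
            (PySem.Dict.empty.insert ""
              (String.ofList (PySem.List.slice detail_str.toList none (some q))))).items


-- ===== PRECONDITION & SPEC =====
def Spec_parse_segments_py (detail_str : String) (out : List (String × String)) : Prop := out = parse_segments_py_alt detail_str
instance (detail_str : String) (out : List (String × String)) : Decidable (Spec_parse_segments_py detail_str out) := by unfold Spec_parse_segments_py; infer_instance

-- ===== CLAIM (what is proved, stated in full; the proofs are below) =====
def Claim_equal_parse_segments_py : Prop := ∀ (detail_str : String), Dom_parse_segments_py detail_str → Spec_parse_segments_py detail_str (parse_segments_py detail_str)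

-- ===== LEMMAS AND PROOFS =====

-- abbreviations used only by the proofs: pvSl cs a b is the slice cs[a:b],
-- pvQs is the list of '?' positions of an enumerated tail, pvStop its first stop
def pvSl (cs : List Char) (a b : Nat) : List Char := (cs.drop a).take (b - a)
def pvQs (rest : List (Int × Char)) : List Int :=
  rest.filterMap (fun ic => if ic.2 = '?' then some ic.1 else none)
def pvStop (cs : List Char) (qs : List Int) : Nat :=
  match qs with | [] => cs.length | q :: _ => q.toNat

lemma pvSl_drop_two (cs : List Char) (a b : Nat) : (pvSl cs a b).drop 2 = pvSl cs (a + 2) b := by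
  unfold pvSl
  rw [List.drop_take, List.drop_drop]
  have h : b - a - 2 = b - (a + 2) := by omega
  rw [h]

lemma pvSl_nil (cs : List Char) (p : Nat) : pvSl cs p p = [] := by simp [pvSl]

lemma pvSl_zero (cs : List Char) (b : Nat) : pvSl cs 0 b = cs.take b := by simp [pvSl]

lemma pvSl_snoc (cs : List Char) (a p : Nat) (ha : a ≤ p) (hp : p < cs.length) :
    pvSl cs a p ++ [cs[p]] = pvSl cs a (p + 1) := by
  have h1 : p + 1 - a = (p - a) + 1 := by omega
  have h2 : p - a < (cs.drop a).length := by simp [List.length_drop]; omega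
  have h3 : (cs.drop a)[p - a] = cs[p] := by
    rw [List.getElem_drop]
    congr 1
    omega
  simp [pvSl, h1, List.take_succ, List.getElem?_eq_getElem h2, h3]

lemma pvSl_two (cs : List Char) (p : Nat) (hp : p + 2 < cs.length) :
    pvSl cs (p + 1) (p + 3) = [cs[p + 1], cs[p + 2]] := by
  apply List.ext_getElem
  · simp [pvSl]; omega
  · intro i hi1 hi2
    simp only [pvSl, List.getElem_take, List.getElem_drop]
    have : i < 2 := by simp [pvSl] at hi1; omega
    interval_cases i <;> simp

lemma pv_ofList_ne_empty (c : Char) (l : List Char) : String.ofList (c :: l) ≠ "" := by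
  intro h
  have := congrArg String.toList h
  simp at this

lemma pv_enum_drop (cs : List Char) (p : Nat) (hp : p < cs.length) :
    (PySem.List.enumerate cs 0).drop p
      = ((p : Int), cs[p]) :: (PySem.List.enumerate cs 0).drop (p + 1) := by
  have hp' : p < (PySem.List.enumerate cs 0).length := by
    simpa [PySem.List.length_enumerate] using hp
  rw [List.drop_eq_getElem_cons hp']
  congr 1
  rw [PySem.List.getElem_enumerate]
  simp

lemma pvQs_nonneg (cs : List Char) (p : Nat) (q : Int)
    (hq : q ∈ pvQs ((PySem.List.enumerate cs 0).drop p)) : 0 ≤ q := by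
  simp only [pvQs, List.mem_filterMap] at hq
  obtain ⟨ic, hmem, hic⟩ := hq
  have hic' : ic.1 = q := by
    by_cases h : ic.2 = '?' <;> simp [h] at hic
    exact hic
  have henum : ic ∈ PySem.List.enumerate cs 0 := List.mem_of_mem_drop hmem
  rw [PySem.List.mem_enumerate_iff] at henum
  obtain ⟨k, hk, hik⟩ := henum
  rw [← hic', hik]
  simp

lemma pv_slice_key (cs : List Char) (p : Nat) (hp : p + 2 < cs.length) :
    PySem.List.slice cs (some ((p : Int) + 1)) (some ((p : Int) + 3))
      = [cs[p + 1], cs[p + 2]] := by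
  have h1 : (p : Int) + 1 = ((p + 1 : Nat) : Int) := by push_cast; ring
  have h3 : (p : Int) + 3 = ((p + 3 : Nat) : Int) := by push_cast; ring
  rw [h1, h3, PySem.List.slice_natCast, ← pvSl, pvSl_two cs p hp]

lemma pv_slice_val (cs : List Char) (p : Nat) (b : Int) (hb : 0 ≤ b) :
    PySem.List.slice cs (some ((p : Int) + 3)) (some b)
      = pvSl cs (p + 3) b.toNat := by
  have h3 : (p : Int) + 3 = ((p + 3 : Nat) : Int) := by push_cast; ring
  have hb' : b = ((b.toNat : Nat) : Int) := by omega
  rw [h3, hb', PySem.List.slice_natCast, pvSl]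
  simp
  omega


lemma pv_main (cs : List Char) (rest : List (Int × Char)) :
    ∀ (p a : Nat) (tmp : PySem.Dict String String) (ty : String),
      rest = (PySem.List.enumerate cs 0).drop p → p ≤ cs.length → a ≤ p → ty ≠ "" →
      parseSegAFin (parseSegAGo cs rest tmp (pvSl cs a p) ty)
        = parseSegBGo cs (pvQs rest)
            (tmp.insert ty (String.ofList (pvSl cs (a + 2) (pvStop cs (pvQs rest))))) := by
  induction rest with
  | nil =>
    intro p a tmp ty hrest hp ha hty
    have hlen := congrArg List.length hrest
    simp [PySem.List.length_enumerate] at hlen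
    have hpn : p = cs.length := by omega
    simp only [parseSegAGo, parseSegAFin, pvQs, List.filterMap_nil, parseSegBGo, pvStop]
    rw [if_neg hty, if_neg hty, ← pvSl_drop_two, hpn]
  | cons hd tl ih =>
    intro p a tmp ty hrest hp ha hty
    have hlen := congrArg List.length hrest
    simp [PySem.List.length_enumerate] at hlen
    have hpn : p < cs.length := by omega
    rw [pv_enum_drop cs p hpn] at hrest
    have hhd : hd = ((p : Int), cs[p]) := (List.cons.injEq _ _ _ _ ▸ hrest).1
    have htl : tl = (PySem.List.enumerate cs 0).drop (p + 1) := (List.cons.injEq _ _ _ _ ▸ hrest).2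
    subst hhd
    by_cases hc : cs[p] = '?'
    · simp only [hc]
      have hqs : pvQs (((p : Int), '?') :: tl) = (p : Int) :: pvQs tl := by simp [pvQs]
      rw [hqs]
      by_cases hbr : (p : Int) + 2 ≥ (cs.length : Int)
      · simp only [parseSegAGo, ne_eq, not_true_eq_false, if_false, if_pos hbr]
        simp only [parseSegBGo, if_pos hbr]
        simp only [pvStop, Int.toNat_natCast]
        rw [← pvSl_drop_two]
        simp [parseSegAFin, hty]
      · have hp2 : p + 2 < cs.length := by omega
        have hget1 : PySem.List.pyGetD cs ((p : Int) + 1) ' ' = cs[p + 1] := by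
          have h : (p : Int) + 1 = ((p + 1 : Nat) : Int) := by push_cast; ring
          rw [h, PySem.List.pyGetD_natCast, List.getD_eq_getElem _ _ (by omega)]
        have hget2 : PySem.List.pyGetD cs ((p : Int) + 2) ' ' = cs[p + 2] := by
          have h : (p : Int) + 2 = ((p + 2 : Nat) : Int) := by push_cast; ring
          rw [h, PySem.List.pyGetD_natCast, List.getD_eq_getElem _ _ (by omega)]
        have hty' : String.ofList [cs[p + 1], cs[p + 2]] ≠ "" := pv_ofList_ne_empty _ _
        simp only [parseSegAGo, ne_eq, not_true_eq_false, if_false, if_neg hbr]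
        rw [if_neg hty, hget1, hget2]
        have hih := ih (p + 1) (p + 1)
          (tmp.insert ty (String.ofList ((pvSl cs a p).drop 2)))
          (String.ofList [cs[p + 1], cs[p + 2]])
          htl (by omega) le_rfl hty'
        rw [pvSl_nil] at hih
        rw [hih]
        simp only [parseSegBGo, if_neg hbr]
        rw [pvSl_drop_two]
        have hstop : pvStop cs ((p : Int) :: pvQs tl) = p := by simp [pvStop]
        rw [hstop, pv_slice_key cs p hp2]
        cases hq : pvQs tl with
        | nil =>
          rw [pv_slice_val cs p (cs.length : Int) (by omega)]
          simp [pvStop]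
        | cons q' qr' =>
          have hq' : (0 : Int) ≤ q' := pvQs_nonneg cs (p + 1) q' (htl ▸ hq ▸ List.mem_cons_self ..)
          rw [pv_slice_val cs p q' hq']
          simp [pvStop]
    · have hqs : pvQs (((p : Int), cs[p]) :: tl) = pvQs tl := by simp [pvQs, hc]
      simp only [parseSegAGo, ne_eq, hc, not_false_eq_true, if_true]
      rw [pvSl_snoc cs a p ha hpn, hqs,
        ih (p + 1) a tmp ty htl (by omega) (by omega) hty]

lemma pv_init (cs : List Char) (rest : List (Int × Char)) :
    ∀ (p : Nat),
      rest = (PySem.List.enumerate cs 0).drop p → p ≤ cs.length →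
      parseSegAFin (parseSegAGo cs rest PySem.Dict.empty (pvSl cs 0 p) "")
        = (match pvQs rest with
           | [] => PySem.Dict.empty
           | q :: qr =>
             if q + 2 ≥ (cs.length : Int) then PySem.Dict.empty
             else parseSegBGo cs (q :: qr)
                    (PySem.Dict.empty.insert "" (String.ofList (PySem.List.slice cs none (some q))))) := by
  induction rest with
  | nil =>
    intro p hrest hp
    simp [parseSegAGo, parseSegAFin, pvQs]
  | cons hd tl ih =>
    intro p hrest hp
    have hlen := congrArg List.length hrest
    simp [PySem.List.length_enumerate] at hlen
    have hpn : p < cs.length := by omega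
    rw [pv_enum_drop cs p hpn] at hrest
    have hhd : hd = ((p : Int), cs[p]) := (List.cons.injEq _ _ _ _ ▸ hrest).1
    have htl : tl = (PySem.List.enumerate cs 0).drop (p + 1) := (List.cons.injEq _ _ _ _ ▸ hrest).2
    subst hhd
    by_cases hc : cs[p] = '?'
    · simp only [hc]
      have hqs : pvQs (((p : Int), '?') :: tl) = (p : Int) :: pvQs tl := by simp [pvQs]
      rw [hqs]
      by_cases hbr : (p : Int) + 2 ≥ (cs.length : Int)
      · simp only [parseSegAGo, ne_eq, not_true_eq_false, if_false, if_pos hbr]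
        simp [parseSegAFin]
      · have hp2 : p + 2 < cs.length := by omega
        have hget1 : PySem.List.pyGetD cs ((p : Int) + 1) ' ' = cs[p + 1] := by
          have h : (p : Int) + 1 = ((p + 1 : Nat) : Int) := by push_cast; ring
          rw [h, PySem.List.pyGetD_natCast, List.getD_eq_getElem _ _ (by omega)]
        have hget2 : PySem.List.pyGetD cs ((p : Int) + 2) ' ' = cs[p + 2] := by
          have h : (p : Int) + 2 = ((p + 2 : Nat) : Int) := by push_cast; ring
          rw [h, PySem.List.pyGetD_natCast, List.getD_eq_getElem _ _ (by omega)]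
        have hty' : String.ofList [cs[p + 1], cs[p + 2]] ≠ "" := pv_ofList_ne_empty _ _
        simp only [parseSegAGo, ne_eq, not_true_eq_false, if_false, if_neg hbr]
        simp only [if_true]
        rw [hget1, hget2]
        have hih := pv_main cs tl (p + 1) (p + 1)
          (PySem.Dict.empty.insert "" (String.ofList (pvSl cs 0 p)))
          (String.ofList [cs[p + 1], cs[p + 2]])
          htl (by omega) le_rfl hty'
        rw [pvSl_nil] at hih
        rw [hih]
        simp only [parseSegBGo, if_neg hbr]
        rw [pv_slice_key cs p hp2, PySem.List.slice_to_natCast, ← pvSl_zero]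
        cases hq : pvQs tl with
        | nil =>
          rw [pv_slice_val cs p (cs.length : Int) (by omega)]
          simp [pvStop]
        | cons q' qr' =>
          have hq' : (0 : Int) ≤ q' := pvQs_nonneg cs (p + 1) q' (htl ▸ hq ▸ List.mem_cons_self ..)
          rw [pv_slice_val cs p q' hq']
          simp [pvStop]
    · have hqs : pvQs (((p : Int), cs[p]) :: tl) = pvQs tl := by simp [pvQs, hc]
      simp only [parseSegAGo, ne_eq, hc, not_false_eq_true, if_true]
      rw [pvSl_snoc cs 0 p (by omega) hpn, hqs, ih (p + 1) htl (by omega)]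

-- ===== VERDICT (by name: the statement is the Claim_ definition above) =====
theorem parse_segments_py_spec : Claim_equal_parse_segments_py := by
  intro s _
  unfold Spec_parse_segments_py parse_segments_py parse_segments_py_alt
  congr 1
  have h0 : PySem.List.enumerate s.toList 0 = (PySem.List.enumerate s.toList 0).drop 0 := by simp
  have hmain := pv_init s.toList (PySem.List.enumerate s.toList 0) 0 h0 (by omega)
  rw [pvSl_nil s.toList 0] at hmain
  rw [hmain]
  rfl
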